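-- pv_equiv track=rewrite | github.com/Rodgers31/audit_app- | backend/tests/test_route_smoke.py | _fill_path_params
-- ===== SOURCE A (Python) =====
-- def _fill_path_params(path: str) -> str:
--     """Replace path parameters with sample values."""
--     replacements = {
--         "{country_id}": "1",
--         "{county_id}": "001",
--         "{entity_id}": "1",
--         "{period_id}": "1",
--         "{doc_id}": "1",
--         "{document_id}": "1",
--         "{line_id}": "1",
--         "{job_id}": "test-job-1",
--         "{source}": "treasury",
--     }
--     result = path
--     for param, value in replacements.items():
--         result = result.replace(param, value)
--     return result
-- ===== SOURCE B (Python) =====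
-- def _fill_path_params(path: str) -> str:
--     """Replace path parameters with sample values by parsing '{...}' tokens and
--     looking each one up in the replacements dict, instead of nine sequential .replace passes."""
--     replacements = {
--         "{country_id}": "1",
--         "{county_id}": "001",
--         "{entity_id}": "1",
--         "{period_id}": "1",
--         "{doc_id}": "1",
--         "{document_id}": "1",
--         "{line_id}": "1",
--         "{job_id}": "test-job-1",
--         "{source}": "treasury",
--     }
--     out = []
--     i = 0
--     n = len(path)
--     while i < n:
--         c = path[i]
--         if c == '{':
--             j = path.find('}', i)
--             if j != -1:
--                 token = path[i:j + 1]
--                 if token in replacements: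
--                     out.append(replacements[token])
--                     i = j + 1
--                     continue
--         out.append(c)
--         i += 1
--     return ''.join(out)
-- ===== Notes on version B (the rewrite author's own statement) =====
-- stated objective: alternative
-- what changed: Replaces nine sequential full-string .replace passes with a single scan that, at each opening brace, extracts the placeholder token up to the next closing brace and resolves it by one dict lookup, copying every other character once.
import Mathlib
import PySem

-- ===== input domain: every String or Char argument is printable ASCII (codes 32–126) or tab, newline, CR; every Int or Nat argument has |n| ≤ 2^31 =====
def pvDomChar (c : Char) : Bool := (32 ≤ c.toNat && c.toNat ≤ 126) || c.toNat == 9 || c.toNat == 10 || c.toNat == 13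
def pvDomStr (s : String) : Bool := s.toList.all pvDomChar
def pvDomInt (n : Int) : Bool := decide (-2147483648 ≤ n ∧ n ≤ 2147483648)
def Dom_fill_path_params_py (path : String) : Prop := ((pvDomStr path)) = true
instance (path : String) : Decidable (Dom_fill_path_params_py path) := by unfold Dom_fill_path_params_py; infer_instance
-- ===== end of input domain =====

-- B replaces A's nine sequential full-string .replace passes by one scan that parses each
-- brace-delimited token and resolves it by a single dict lookup (objective: alternative algorithm;
-- not measured faster in CPython).

-- ===== PORT A =====
-- The `replacements` dict literal of A; `.items()` iterates it in insertion order,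
-- which is exactly this list of pairs (keys/values as code-point lists).
def pvTable : List (List Char × List Char) :=
  [("{country_id}".toList, "1".toList),
   ("{county_id}".toList, "001".toList),
   ("{entity_id}".toList, "1".toList),
   ("{period_id}".toList, "1".toList),
   ("{doc_id}".toList, "1".toList),
   ("{document_id}".toList, "1".toList),
   ("{line_id}".toList, "1".toList),
   ("{job_id}".toList, "test-job-1".toList)  ,
   ("{source}".toList, "treasury".toList)]

-- A: result = path; for param, value in replacements.items(): result = result.replace(param, value)
-- str.replace is ported exactly by PySem.Chars.replace on the code points.
def fill_path_params_py (path : String) : String :=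
  String.ofList (pvTable.foldl (fun r kv => PySem.Chars.replace r kv.1 kv.2) path.toList)

-- ===== PORT B =====
-- B's `replacements` dict, kept as the String pairs of the source.
def pvDict : List (String × String) :=
  [("{country_id}", "1"), ("{county_id}", "001"), ("{entity_id}", "1"),
   ("{period_id}", "1"), ("{doc_id}", "1"), ("{document_id}", "1"),
   ("{line_id}", "1"), ("{job_id}", "test-job-1"), ("{source}", "treasury")]

-- B's `token in replacements` + `replacements[token]`: first (here: unique) key equal to
-- the token; exact for a Python dict literal with distinct keys.
def pvLookup (tok : List Char) : Option (List Char) :=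
  (pvDict.find? (fun kv => kv.1.toList == tok)).map (fun kv => kv.2.toList)

-- B's while loop: at an opening brace with a later closing one (`path.find` from i succeeds),
-- the takeWhile block is the text strictly between the braces, so the token is `path[i:j+1]`
-- and `i = j+1` drops that block plus the closing brace;
-- on a dict hit emit the value, otherwise copy one character.
def pvBraceScan : List Char → List Char
  | [] => []
  | c :: t =>
    if c = '{' ∧ t.contains '}' then
      match pvLookup ('{' :: t.takeWhile (fun x => x != '}') ++ ['}']) with
      | some v => v ++ pvBraceScan (t.drop ((t.takeWhile (fun x => x != '}')).length + 1))
      | none => c :: pvBraceScan t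
    else c :: pvBraceScan t
termination_by s => s.length
decreasing_by
  · simp only [List.length_cons, List.length_drop]
    omega
  · simp
  · simp

def fill_path_params_py_alt (path : String) : String :=
  String.ofList (pvBraceScan path.toList)

-- ===== PRECONDITION & SPEC =====
def Spec_fill_path_params_py (path : String) (out : String) : Prop := out = fill_path_params_py_alt path
instance (path : String) (out : String) : Decidable (Spec_fill_path_params_py path out) := by unfold Spec_fill_path_params_py; infer_instance

-- ===== CLAIM (what is proved, stated in full; the proofs are below) =====
def Claim_equal_fill_path_params_py : Prop := ∀ (path : String), Dom_fill_path_params_py path → Spec_fill_path_params_py path (fill_path_params_py path)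

-- ===== LEMMAS AND PROOFS =====

-- A clean structural-recursion presentation of Python's str.replace (all occurrences,
-- left to right, non-overlapping); bridged to PySem.Chars.replace below.
def pvRep (old new : List Char) : List Char → List Char
  | [] => []
  | c :: t =>
    if old.isPrefixOf (c :: t) then new ++ pvRep old new (t.drop (old.length - 1))
    else c :: pvRep old new t
termination_by s => s.length
decreasing_by
  · simp only [List.length_cons, List.length_drop]
    omega
  · simp

-- Intermediate form the two sides are bridged through: a first-match scan over the table.
def pvFindMatch (kvs : List (List Char × List Char)) (s : List Char) : Option (List Char × List Char) :=
  kvs.find? (fun kv => kv.1.isPrefixOf s)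

def pvScan (kvs : List (List Char × List Char)) : List Char → List Char
  | [] => []
  | c :: t =>
    match pvFindMatch kvs (c :: t) with
    | some (k, _v) => _v ++ pvScan kvs (t.drop (k.length - 1))
    | none => c :: pvScan kvs t
termination_by s => s.length
decreasing_by
  · simp only [List.length_cons, List.length_drop]
    omega
  · simp

lemma pvRep_go (old new : List Char) (hold : old ≠ []) :
    ∀ (fuel : Nat) (l acc : List Char), l.length ≤ fuel →
      PySem.Chars.replace.go old new fuel l acc = acc.reverse ++ pvRep old new l := by
  intro fuel
  induction fuel with
  | zero =>
    intro l acc hl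
    have : l = [] := List.eq_nil_of_length_eq_zero (Nat.le_zero.mp hl)
    subst this
    simp [PySem.Chars.replace.go, pvRep]
  | succ n ih =>
    intro l acc hl
    cases l with
    | nil => simp [PySem.Chars.replace.go, pvRep]
    | cons c t =>
      rw [PySem.Chars.replace.go]
      by_cases hp : old.isPrefixOf (c :: t)
      · rw [if_pos hp]
        obtain ⟨o, ot, rfl⟩ : ∃ o ot, old = o :: ot := by
          cases old with
          | nil => exact absurd rfl hold
          | cons o ot => exact ⟨o, ot, rfl⟩
        have hdrop : List.drop (o :: ot).length (c :: t) = t.drop ((o :: ot).length - 1) := by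
          simp
        rw [hdrop, ih _ _ (by
          simp only [List.length_cons] at hl
          simp only [List.length_drop]
          omega)]
        rw [pvRep, if_pos hp]
        simp
      · rw [if_neg hp]
        rw [ih _ _ (by simp only [List.length_cons] at hl; omega)]
        rw [pvRep, if_neg hp]
        simp

lemma pvReplace_eq_pvRep (s old new : List Char) (hold : old ≠ []) :
    PySem.Chars.replace s old new = pvRep old new s := by
  rw [PySem.Chars.replace, if_neg (by simp [hold])]
  simpa using pvRep_go old new hold s.length s [] le_rfl

lemma pvRep_nil (old new : List Char) : pvRep old new [] = [] := by rw [pvRep]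

lemma pvRep_neg (old new : List Char) (c : Char) (t : List Char) (h : ¬ old <+: (c :: t)) :
    pvRep old new (c :: t) = c :: pvRep old new t := by
  rw [pvRep, if_neg (by simpa [List.isPrefixOf_iff_prefix] using h)]

lemma pvRep_pos (old new : List Char) (c : Char) (t : List Char) (h : old <+: (c :: t)) :
    pvRep old new (c :: t) = new ++ pvRep old new (t.drop (old.length - 1)) := by
  rw [pvRep, if_pos (by simpa [List.isPrefixOf_iff_prefix] using h)]

lemma pvScan_nil (kvs : List (List Char × List Char)) : pvScan kvs [] = [] := by rw [pvScan]

lemma pvScan_pos (kvs : List (List Char × List Char)) (c : Char) (t k v : List Char)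
    (h : pvFindMatch kvs (c :: t) = some (k, v)) :
    pvScan kvs (c :: t) = v ++ pvScan kvs (t.drop (k.length - 1)) := by
  rw [pvScan, h]

lemma pvScan_neg (kvs : List (List Char × List Char)) (c : Char) (t : List Char)
    (h : pvFindMatch kvs (c :: t) = none) :
    pvScan kvs (c :: t) = c :: pvScan kvs t := by
  rw [pvScan, h]

lemma pvFind_none (kvs : List (List Char × List Char)) (s : List Char)
    (h : ∀ kv ∈ kvs, ¬ kv.1 <+: s) : pvFindMatch kvs s = none := by
  apply List.find?_eq_none.mpr
  intro kv hkv
  simpa [List.isPrefixOf_iff_prefix] using h kv hkv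

lemma pvFind_none_iff (kvs : List (List Char × List Char)) (s : List Char) :
    pvFindMatch kvs s = none ↔ ∀ kv ∈ kvs, ¬ kv.1 <+: s := by
  unfold pvFindMatch
  rw [List.find?_eq_none]
  simp [List.isPrefixOf_iff_prefix]

lemma pvFind_pos (kvs : List (List Char × List Char)) (s k v : List Char)
    (hm : (k, v) ∈ kvs) (hp : k <+: s)
    (huniq : ∀ kv ∈ kvs, kv.1 <+: s → kv = (k, v)) :
    pvFindMatch kvs s = some (k, v) := by
  induction kvs with
  | nil => cases hm
  | cons a rest ih =>
    by_cases ha : a.1 <+: s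
    · have : a = (k, v) := huniq a (List.mem_cons_self) ha
      subst this
      unfold pvFindMatch
      exact List.find?_cons_of_pos (by simpa [List.isPrefixOf_iff_prefix] using ha)
    · have hm' : (k, v) ∈ rest := by
        rcases List.mem_cons.mp hm with h | h
        · exact absurd (show a.1 <+: s by rw [← h]; exact hp) ha
        · exact h
      have hrest : pvFindMatch rest s = some (k, v) :=
        ih hm' (fun kv hkv h => huniq kv (List.mem_cons_of_mem a hkv) h)
      unfold pvFindMatch at hrest ⊢
      rw [List.find?_cons_of_neg (by simpa [List.isPrefixOf_iff_prefix] using ha)]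
      exact hrest

lemma pvFind_some_facts (kvs : List (List Char × List Char)) (s k v : List Char)
    (h : pvFindMatch kvs s = some (k, v)) : (k, v) ∈ kvs ∧ k <+: s := by
  refine ⟨List.mem_of_find?_eq_some h, ?_⟩
  have := List.find?_some h
  simpa [List.isPrefixOf_iff_prefix] using this

-- The nonempty proper suffixes of the table's keys.
def pvSuf : List (List Char) :=
  (pvTable.flatMap (fun kv => kv.1.tail.tails)).filter (fun x => !x.isEmpty)

-- ---- finite facts about the literal table, all by decide ----
lemma pvT_key_head : ∀ kv ∈ pvTable, kv.1.head? = some '{' := by decide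
lemma pvT_key_tail_nobrace : ∀ kv ∈ pvTable, '{' ∉ kv.1.tail := by decide
lemma pvT_key_tail_ne : ∀ kv ∈ pvTable, kv.1.tail ≠ [] := by decide
lemma pvT_val_nobrace : ∀ kv ∈ pvTable, '{' ∉ kv.2 := by decide
lemma pvT_not_prefix : ∀ kv1 ∈ pvTable, ∀ kv2 ∈ pvTable, kv1.1 <+: kv2.1 → kv1 = kv2 := by decide
lemma pvSuf_ne : ∀ x ∈ pvSuf, x ≠ [] := by decide
lemma pvSuf_key : ∀ x ∈ pvSuf, ∀ kv ∈ pvTable, ¬ x <+: kv.1 ∧ ¬ kv.1 <+: x := by decide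
lemma pvSuf_val : ∀ x ∈ pvSuf, ∀ kv ∈ pvTable, ¬ x <+: kv.2 ∧ ¬ kv.2 <+: x := by decide
-- facts connecting B's dict / key shape to the table
lemma pvT_shape : ∀ kv ∈ pvTable,
    kv.1 = '{' :: kv.1.tail.takeWhile (fun x => x != '}') ++ ['}'] ∧
    '}' ∉ kv.1.tail.takeWhile (fun x => x != '}') := by decide
lemma pvD_mem : ∀ kv ∈ pvDict, (kv.1.toList, kv.2.toList) ∈ pvTable := by decide
lemma pvLookup_hit : ∀ kv ∈ pvTable, pvLookup kv.1 = some kv.2 := by decide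

lemma pvSuf_mem_iff (x : List Char) :
    x ∈ pvSuf ↔ (∃ kv ∈ pvTable, x <:+ kv.1.tail) ∧ x ≠ [] := by
  unfold pvSuf
  simp [List.mem_filter, List.mem_flatMap, List.mem_tails, and_comm]

lemma pvSuf_tail_closed (x : List Char) (c : Char) (x' : List Char)
    (hx : x ∈ pvSuf) (hcx : x = c :: x') (hne : x' ≠ []) : x' ∈ pvSuf := by
  rcases (pvSuf_mem_iff x).mp hx with ⟨⟨kv, hkv, hsuf⟩, _⟩
  refine (pvSuf_mem_iff x').mpr ⟨⟨kv, hkv, ?_⟩, hne⟩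
  have : x' <:+ x := ⟨[c], by simp [hcx]⟩
  exact this.trans hsuf

lemma pvSuf_of_key_tail (kv : List Char × List Char) (hkv : kv ∈ pvTable) :
    kv.1.tail ∈ pvSuf :=
  (pvSuf_mem_iff kv.1.tail).mpr ⟨⟨kv, hkv, List.suffix_refl _⟩, pvT_key_tail_ne kv hkv⟩

lemma pvHead_of_prefix (k : List Char) (a : Char) (z : List Char)
    (hh : k.head? = some '{') (hp : k <+: a :: z) : a = '{' := by
  cases k with
  | nil => simp at hh
  | cons b k' =>
    have : b = '{' := by simpa using hh
    exact ((List.cons_prefix_cons.mp hp).1.symm.trans this)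

lemma pvKey_uniq (s k1 k2 : List Char) (v1 v2 : List Char)
    (h1 : (k1, v1) ∈ pvTable) (h2 : (k2, v2) ∈ pvTable)
    (p1 : k1 <+: s) (p2 : k2 <+: s) : (k1, v1) = (k2, v2) := by
  rcases List.prefix_or_prefix_of_prefix p1 p2 with h | h
  · exact pvT_not_prefix (k1, v1) h1 (k2, v2) h2 h
  · exact (pvT_not_prefix (k2, v2) h2 (k1, v1) h1 h).symm

-- replace skips over a brace-free block.
lemma pvRep_skip (old new : List Char) (hh : old.head? = some '{') :
    ∀ (p u : List Char), '{' ∉ p → pvRep old new (p ++ u) = p ++ pvRep old new u := by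
  intro p
  induction p with
  | nil => intro u _; simp
  | cons a p' ih =>
    intro u hv
    have hna : ¬ old <+: a :: (p' ++ u) := by
      intro hcon
      exact hv (by simp [pvHead_of_prefix old a (p' ++ u) hh hcon])
    rw [List.cons_append, pvRep_neg old new a (p' ++ u) hna,
      ih u (fun h => hv (List.mem_cons_of_mem a h))]
    simp

-- the scanner skips over a brace-free block (all keys start with '{').
lemma pvScan_skip (kvs : List (List Char × List Char))
    (hh : ∀ kv ∈ kvs, kv.1.head? = some '{') :
    ∀ (p u : List Char), '{' ∉ p → pvScan kvs (p ++ u) = p ++ pvScan kvs u := by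
  intro p
  induction p with
  | nil => intro u _; simp
  | cons a p' ih =>
    intro u hv
    have hfind : pvFindMatch kvs (a :: (p' ++ u)) = none := by
      apply pvFind_none
      intro kv hkv hcon
      exact hv (by simp [pvHead_of_prefix kv.1 a (p' ++ u) (hh kv hkv) hcon])
    rw [List.cons_append, pvScan_neg kvs a (p' ++ u) hfind,
      ih u (fun h => hv (List.mem_cons_of_mem a h))]
    simp

-- Transfer lemma: a single-pass over any sub-table of pvTable neither creates nor destroys
-- a prefix occurrence of a proper key-suffix.
lemma pvScan_transfer (kvs : List (List Char × List Char))
    (hsub : ∀ kv ∈ kvs, kv ∈ pvTable) :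
    ∀ (n : Nat) (s x : List Char), s.length ≤ n → x ∈ pvSuf →
      (x <+: pvScan kvs s ↔ x <+: s) := by
  intro n
  induction n with
  | zero =>
    intro s x hl hx
    have : s = [] := List.eq_nil_of_length_eq_zero (Nat.le_zero.mp hl)
    subst this
    rw [pvScan_nil]
  | succ n ih =>
    intro s x hl hx
    cases s with
    | nil => rw [pvScan_nil]
    | cons c t =>
      cases hfind : pvFindMatch kvs (c :: t) with
      | some kv =>
        obtain ⟨k, v⟩ := kv
        obtain ⟨hmem, hpre⟩ := pvFind_some_facts kvs (c :: t) k v hfind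
        rw [pvScan_pos kvs c t k v hfind]
        have hkT := hsub _ hmem
        apply iff_of_false
        · intro hcon
          rcases List.prefix_or_prefix_of_prefix hcon (List.prefix_append v _) with h | h
          · exact (pvSuf_val x hx (k, v) hkT).1 h
          · exact (pvSuf_val x hx (k, v) hkT).2 h
        · intro hcon
          rcases List.prefix_or_prefix_of_prefix hcon hpre with h | h
          · exact (pvSuf_key x hx (k, v) hkT).1 h
          · exact (pvSuf_key x hx (k, v) hkT).2 h
      | none =>
        rw [pvScan_neg kvs c t hfind]
        cases x with
        | nil => exact absurd rfl (pvSuf_ne [] hx)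
        | cons x0 x' =>
          simp only [List.cons_prefix_cons]
          apply and_congr Iff.rfl
          by_cases hx' : x' = []
          · subst hx'; simp
          · exact ih t x' (by simpa using hl) (pvSuf_tail_closed _ x0 x' hx rfl hx')

-- Ladder: one more sequential replace on top of the scanner over a table prefix equals
-- the scanner over the extended table.
lemma pvLadder (kvs : List (List Char × List Char)) (k v : List Char)
    (hsub : ∀ kv ∈ kvs ++ [(k, v)], kv ∈ pvTable) :
    ∀ (n : Nat) (s : List Char), s.length ≤ n →
      pvRep k v (pvScan kvs s) = pvScan (kvs ++ [(k, v)]) s := by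
  have hsub0 : ∀ kv ∈ kvs, kv ∈ pvTable := fun kv h => hsub kv (List.mem_append_left _ h)
  have hkvT : (k, v) ∈ pvTable := hsub (k, v) (List.mem_append_right _ (by simp))
  have hkh : k.head? = some '{' := pvT_key_head (k, v) hkvT
  have hkne : k ≠ [] := by intro h; rw [h] at hkh; simp at hkh
  have hh0 : ∀ kv ∈ kvs, kv.1.head? = some '{' := fun kv h => pvT_key_head kv (hsub0 kv h)
  intro n
  induction n with
  | zero =>
    intro s hl
    have : s = [] := List.eq_nil_of_length_eq_zero (Nat.le_zero.mp hl)
    subst this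
    rw [pvScan_nil, pvScan_nil, pvRep_nil]
  | succ n ih =>
    intro s hl
    cases s with
    | nil => rw [pvScan_nil, pvScan_nil, pvRep_nil]
    | cons c t =>
      cases hfind : pvFindMatch kvs (c :: t) with
      | some kv0 =>
        obtain ⟨k0, v0⟩ := kv0
        obtain ⟨hmem0, hpre0⟩ := pvFind_some_facts kvs (c :: t) k0 v0 hfind
        have hk0T := hsub0 _ hmem0
        have hk0ne : k0 ≠ [] := by
          have := pvT_key_head (k0, v0) hk0T
          intro h; rw [h] at this; simp at this
        rw [pvScan_pos kvs c t k0 v0 hfind]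
        rw [pvRep_skip k v hkh v0 _ (pvT_val_nobrace (k0, v0) hk0T)]
        have hlen : (t.drop (k0.length - 1)).length ≤ n := by
          simp only [List.length_cons] at hl
          simp only [List.length_drop]
          omega
        rw [ih _ hlen]
        have huniq : ∀ kv ∈ kvs ++ [(k, v)], kv.1 <+: c :: t → kv = (k0, v0) := by
          intro kv hkv hp
          obtain ⟨ka, va⟩ := kv
          exact pvKey_uniq (c :: t) ka k0 va v0 (hsub _ hkv) hk0T hp hpre0
        rw [pvScan_pos (kvs ++ [(k, v)]) c t k0 v0
          (pvFind_pos _ _ _ _ (List.mem_append_left _ hmem0) hpre0 huniq)]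
      | none =>
        have hnone : ∀ kv ∈ kvs, ¬ kv.1 <+: c :: t := (pvFind_none_iff kvs (c :: t)).mp hfind
        rw [pvScan_neg kvs c t hfind]
        by_cases hk : k <+: c :: t
        · -- the new key matches here
          obtain ⟨kh, ktl, rfl⟩ : ∃ kh ktl, k = kh :: ktl := by
            cases k with
            | nil => exact absurd rfl hkne
            | cons kh ktl => exact ⟨kh, ktl, rfl⟩
          obtain ⟨hkc, hktlt⟩ := List.cons_prefix_cons.mp hk
          obtain ⟨u, hu⟩ := hktlt
          -- left side: the sub-table scanner copies the key block unchanged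
          have hscan : pvScan kvs t = ktl ++ pvScan kvs u := by
            rw [← hu]
            exact pvScan_skip kvs hh0 ktl u
              (by simpa using pvT_key_tail_nobrace (kh :: ktl, v) hkvT)
          rw [hscan]
          have hdropk : (ktl ++ pvScan kvs u).drop ((kh :: ktl).length - 1) = pvScan kvs u := by
            simp
          have hrep : pvRep (kh :: ktl) v (c :: (ktl ++ pvScan kvs u)) =
              v ++ pvRep (kh :: ktl) v (pvScan kvs u) := by
            rw [pvRep_pos (kh :: ktl) v c (ktl ++ pvScan kvs u)
              (List.cons_prefix_cons.mpr ⟨hkc, List.prefix_append _ _⟩), hdropk]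
          rw [hrep]
          have hulen : u.length ≤ n := by
            have : t.length = ktl.length + u.length := by rw [← hu]; simp
            simp only [List.length_cons] at hl
            omega
          rw [ih u hulen]
          -- right side: the extended scanner consumes the key
          have huniq : ∀ kv ∈ kvs ++ [(kh :: ktl, v)], kv.1 <+: c :: t → kv = (kh :: ktl, v) := by
            intro kv hkv hp
            obtain ⟨ka, va⟩ := kv
            exact pvKey_uniq (c :: t) ka (kh :: ktl) va v (hsub _ hkv) hkvT hp hk
          rw [pvScan_pos (kvs ++ [(kh :: ktl, v)]) c t (kh :: ktl) v
            (pvFind_pos _ _ _ _ (List.mem_append_right _ (by simp)) hk huniq)]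
          have : t.drop ((kh :: ktl).length - 1) = u := by rw [← hu]; simp
          rw [this]
        · -- no key matches here: both sides copy c
          have hrepneg : ¬ k <+: c :: pvScan kvs t := by
            intro hcon
            have hc : c = '{' := pvHead_of_prefix k c _ hkh hcon
            obtain ⟨kh, ktl, rfl⟩ : ∃ kh ktl, k = kh :: ktl := by
              cases k with
              | nil => exact absurd rfl hkne
              | cons kh ktl => exact ⟨kh, ktl, rfl⟩
            have hkh' : kh = '{' := by simpa using hkh
            obtain ⟨-, hktl⟩ := List.cons_prefix_cons.mp hcon
            by_cases hktlne : ktl = []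
            · exact hk (by simp [hktlne, hkh', hc])
            · have hktlS : ktl ∈ pvSuf := by
                have := pvSuf_of_key_tail (kh :: ktl, v) hkvT
                simpa using this
              have : ktl <+: t :=
                (pvScan_transfer kvs hsub0 n t ktl (by simpa using hl) hktlS).mp hktl
              exact hk (by rw [hc, hkh']; exact List.cons_prefix_cons.mpr ⟨rfl, this⟩)
          rw [pvRep_neg k v c (pvScan kvs t) hrepneg]
          have hfind' : pvFindMatch (kvs ++ [(k, v)]) (c :: t) = none := by
            apply pvFind_none
            intro kv hkv
            rcases List.mem_append.mp hkv with h | h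
            · exact hnone kv h
            · have : kv = (k, v) := by simpa using h
              rw [this]; exact hk
          rw [pvScan_neg (kvs ++ [(k, v)]) c t hfind', ih t (by simpa using hl)]

lemma pvScan_empty_table (s : List Char) : pvScan [] s = s := by
  induction s with
  | nil => rw [pvScan_nil]
  | cons c t ih =>
    rw [pvScan_neg [] c t (pvFind_none [] _ (by simp)), ih]

-- Sequential replaces over any prefix of the table equal the single pass over it.
lemma pvFold (kvs : List (List Char × List Char)) (hsub : ∀ kv ∈ kvs, kv ∈ pvTable)
    (l : List Char) :
    kvs.foldl (fun r kv => PySem.Chars.replace r kv.1 kv.2) l = pvScan kvs l := by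
  induction kvs using List.reverseRecOn with
  | nil => simpa using (pvScan_empty_table l).symm
  | append_singleton ys e ih =>
    obtain ⟨k, v⟩ := e
    have hkvT : (k, v) ∈ pvTable := hsub (k, v) (List.mem_append_right _ (by simp))
    have hkne : k ≠ [] := by
      have := pvT_key_head (k, v) hkvT
      intro h; rw [h] at this; simp at this
    rw [List.foldl_append]
    simp only [List.foldl_cons, List.foldl_nil]
    rw [pvReplace_eq_pvRep _ k v hkne,
      ih (fun kv h => hsub kv (List.mem_append_left _ h)),
      pvLadder ys k v hsub l.length l le_rfl]

-- ---- bridge from pvScan to B's brace-token scan ----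

lemma pvTakeWhile_append (body rest : List Char) (hb : '}' ∉ body) :
    (body ++ '}' :: rest).takeWhile (fun x => x != '}') = body := by
  induction body with
  | nil => simp
  | cons a b ih =>
    have ha : a ≠ '}' := fun h => hb (by simp [h])
    simp only [List.cons_append, List.takeWhile_cons]
    rw [if_pos (by simpa using ha), ih (fun h => hb (List.mem_cons_of_mem a h))]

lemma pvContains_split (t : List Char) (h : t.contains '}' = true) :
    t = t.takeWhile (fun x => x != '}') ++
        '}' :: t.drop ((t.takeWhile (fun x => x != '}')).length + 1) := by
  induction t with
  | nil => simp at h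
  | cons a t ih =>
    by_cases ha : a = '}'
    · subst ha
      simp
    · have ht : t.contains '}' = true := by
        simp only [List.contains_cons] at h
        rcases Bool.or_eq_true_iff.mp h with h' | h'
        · exact absurd (beq_iff_eq.mp h').symm ha
        · exact h'
      have := ih ht
      simp only [List.takeWhile_cons]
      rw [if_pos (by simpa using ha)]
      simp only [List.length_cons, List.cons_append, List.drop_succ_cons]
      exact congrArg (a :: ·) this

lemma pvLookup_none (tok : List Char)
    (h : ∀ kv ∈ pvTable, kv.1 ≠ tok) : pvLookup tok = none := by
  unfold pvLookup
  rw [List.find?_eq_none.mpr]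
  · rfl
  · intro kv hkv
    simpa using h _ (pvD_mem kv hkv)

lemma pvBrace_nil : pvBraceScan [] = [] := by rw [pvBraceScan]

lemma pvScan_eq_brace : ∀ (n : Nat) (s : List Char), s.length ≤ n →
    pvScan pvTable s = pvBraceScan s := by
  intro n
  induction n with
  | zero =>
    intro s hl
    have : s = [] := List.eq_nil_of_length_eq_zero (Nat.le_zero.mp hl)
    subst this
    rw [pvScan_nil, pvBrace_nil]
  | succ n ih =>
    intro s hl
    cases s with
    | nil => rw [pvScan_nil, pvBrace_nil]
    | cons c t =>
      cases hfind : pvFindMatch pvTable (c :: t) with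
      | some kv =>
        obtain ⟨k, v⟩ := kv
        obtain ⟨hmem, hpre⟩ := pvFind_some_facts pvTable (c :: t) k v hfind
        obtain ⟨hshape, hnob⟩ := pvT_shape (k, v) hmem
        set body := k.tail.takeWhile (fun x => x != '}') with hbody
        have hc : c = '{' := pvHead_of_prefix k c t (pvT_key_head (k, v) hmem) hpre
        -- t = body ++ '}' :: rest
        have hkk : k = '{' :: body ++ ['}'] := hshape
        obtain ⟨rest, hrest⟩ : ∃ rest, t = body ++ '}' :: rest := by
          obtain ⟨u, hu⟩ := hpre
          refine ⟨u, ?_⟩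
          rw [hkk] at hu
          simp only [List.cons_append, List.append_assoc,
            List.cons.injEq] at hu
          exact hu.2.symm
        have htk : t.takeWhile (fun x => x != '}') = body := by
          rw [hrest]; exact pvTakeWhile_append body rest hnob
        have hcont : t.contains '}' = true := by
          rw [hrest]; simp
        have hdrop : t.drop (body.length + 1) = rest := by
          rw [hrest]; simp
        rw [pvScan_pos pvTable c t k v hfind]
        rw [pvBraceScan, if_pos ⟨hc, hcont⟩, htk]
        have htok : '{' :: body ++ ['}'] = k := hkk.symm
        rw [htok]
        have : pvLookup k = some v := pvLookup_hit (k, v) hmem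
        rw [this]
        have hklen : k.length - 1 = body.length + 1 := by
          rw [hkk]; simp
        rw [hklen, hdrop]
        have hrl : rest.length ≤ n := by
          have : t.length = body.length + 1 + rest.length := by rw [hrest]; simp; omega
          simp only [List.length_cons] at hl
          omega
        rw [ih rest hrl]
      | none =>
        have hnone : ∀ kv ∈ pvTable, ¬ kv.1 <+: c :: t := (pvFind_none_iff pvTable (c :: t)).mp hfind
        rw [pvScan_neg pvTable c t hfind]
        have htl : t.length ≤ n := by simpa using hl
        by_cases hc : c = '{' ∧ t.contains '}' = true
        · obtain ⟨hc1, hc2⟩ := hc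
          set pre := t.takeWhile (fun x => x != '}') with hpre
          have hsplit := pvContains_split t hc2
          have hlk : pvLookup ('{' :: pre ++ ['}']) = none := by
            apply pvLookup_none
            intro kv hkv heq
            apply hnone kv hkv
            rw [heq, hc1]
            refine ⟨t.drop (pre.length + 1), ?_⟩
            simp only [List.cons_append, List.append_assoc]
            exact congrArg ('{' :: ·) hsplit.symm
          rw [pvBraceScan, if_pos ⟨hc1, hc2⟩, hlk, ih t htl]
        · rw [pvBraceScan, if_neg (by simpa using hc), ih t htl]

-- ===== VERDICT (by name: the statement is the Claim_ definition above) =====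
theorem fill_path_params_py_spec : Claim_equal_fill_path_params_py := by
  intro path _
  unfold Spec_fill_path_params_py fill_path_params_py fill_path_params_py_alt
  rw [pvFold pvTable (fun kv h => h) path.toList,
    pvScan_eq_brace path.toList.length path.toList le_rfl]
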